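-- pv_equiv track=rewrite | github.com/shriraj-chinchwade-bbi/Assessment | assignment2/file21.py | smallnum
-- ===== SOURCE A (Python) =====
-- def smallnum(nums):
--     ans=[]
--     for i in range(len(nums)):
--         counter=0
--         for j in range(len(nums)):
--             if nums[i]>nums[j]:
--                 counter+=1
--                 ans.append(counter)
--     return ans
-- ===== SOURCE B (Python) =====
-- import bisect
--
-- def smallnum(nums):
--     s = sorted(nums)
--     ans = []
--     for i in range(len(nums)):
--         k = bisect.bisect_left(s, nums[i])
--         ans.extend(range(1, k + 1))
--     return ans
-- ===== Notes on version B (the rewrite author's own statement) =====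
-- stated objective: alternative
-- what changed: Replaces A's nested rescan (an inner counter loop per element) with one sort plus a bisect_left binary search per element, emitting each rank run 1..k directly via range; the output itself is quadratic in size, so total cost stays output-bound.
import Mathlib
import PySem

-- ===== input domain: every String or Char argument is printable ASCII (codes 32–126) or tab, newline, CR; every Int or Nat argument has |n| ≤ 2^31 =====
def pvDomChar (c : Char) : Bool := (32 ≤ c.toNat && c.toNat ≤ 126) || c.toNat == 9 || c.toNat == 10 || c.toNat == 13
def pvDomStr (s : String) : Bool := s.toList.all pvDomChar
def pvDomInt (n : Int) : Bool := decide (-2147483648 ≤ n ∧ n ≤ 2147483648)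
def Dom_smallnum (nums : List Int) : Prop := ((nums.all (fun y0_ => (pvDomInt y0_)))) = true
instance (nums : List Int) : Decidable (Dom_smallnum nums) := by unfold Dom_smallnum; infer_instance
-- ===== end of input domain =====

-- B replaces A's nested rescan with one sort plus a binary search (bisect_left) per element; the quadratic-size output keeps total cost output-bound.

-- ===== PORT A =====
def smallnum (nums : List Int) : List Int :=
  (PySem.List.pyRange 0 (PySem.List.len nums) 1).foldl
    (fun ans i =>
      ((PySem.List.pyRange 0 (PySem.List.len nums) 1).foldl
        (fun (st : Int × List Int) j =>
          if PySem.List.pyGetD nums i 0 > PySem.List.pyGetD nums j 0 then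
            (st.1 + 1, st.2 ++ [st.1 + 1])
          else st)
        (0, ans)).2)
    []

-- ===== PORT B =====
def smallnum_alt (nums : List Int) : List Int :=
  let s := PySem.List.sorted nums (fun v => v) false
  (PySem.List.pyRange 0 (PySem.List.len nums) 1).foldl
    (fun ans i =>
      let k : Int := (PySem.List.bisectLeft s (PySem.List.pyGetD nums i 0) : Int)
      ans ++ PySem.List.pyRange 1 (k + 1) 1)
    []

-- ===== PRECONDITION & SPEC =====
def Spec_smallnum (nums : List Int) (out : List Int) : Prop := out = smallnum_alt nums
instance (nums : List Int) (out : List Int) : Decidable (Spec_smallnum nums out) := by unfold Spec_smallnum; infer_instance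

-- ===== CLAIM (what is proved, stated in full; the proofs are below) =====
def Claim_equal_smallnum : Prop := ∀ (nums : List Int), Dom_smallnum nums → Spec_smallnum nums (smallnum nums)

-- ===== LEMMAS AND PROOFS =====

-- A's inner loop: starting from counter c it appends the run c+1, c+2, …, c+m,
-- where m is the number of elements of l strictly below x.
theorem smallnum_inner_fold (x : Int) (l : List Int) (c : Int) (acc : List Int) :
    l.foldl (fun (st : Int × List Int) y =>
        if x > y then (st.1 + 1, st.2 ++ [st.1 + 1]) else st) (c, acc)
      = (c + (l.countP (fun y => decide (y < x)) : Int),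
         acc ++ PySem.List.pyRange (c + 1) (c + 1 + (l.countP (fun y => decide (y < x)) : Int)) 1) := by
  induction l generalizing c acc with
  | nil => simp [PySem.List.pyRange_one_eq_nil]
  | cons h t ih =>
    by_cases hx : h < x
    · simp only [List.foldl_cons, List.countP_cons, hx, decide_true, gt_iff_lt, if_pos]
      rw [ih]
      set m := t.countP (fun y => decide (y < x)) with hm
      refine Prod.ext (by simp; ring) ?_
      have hcons : PySem.List.pyRange (c + 1) (c + 1 + ((m : Int) + 1)) 1
          = (c + 1) :: PySem.List.pyRange (c + 1 + 1) (c + 1 + 1 + (m : Int)) 1 := by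
        rw [PySem.List.pyRange_one_cons (by omega)]
        congr 1
        congr 1
        omega
      push_cast
      rw [hcons]
      simp
    · simp [List.foldl_cons, hx, ih]

-- bisect_left on a sorted list counts the elements strictly below x.
theorem smallnum_bisect_count (s : List Int) (x : Int) (hs : s.Pairwise (· ≤ ·)) :
    PySem.List.bisectLeft s x = s.countP (fun y => decide (y < x)) := by
  obtain ⟨hk, hlt, hge⟩ := PySem.List.bisectLeft_spec s x hs
  set k := PySem.List.bisectLeft s x with hkdef
  conv_rhs => rw [(List.take_append_drop k s).symm]
  rw [List.countP_append]
  have h1 : (s.take k).countP (fun y => decide (y < x)) = k := by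
    rw [List.countP_eq_length.mpr, List.length_take_of_le hk]
    intro a ha
    obtain ⟨i, hi, rfl⟩ := List.getElem_of_mem ha
    have hil : i < s.length := lt_of_lt_of_le (by simp at hi; omega) hk
    have hik : i < k := by simp at hi; omega
    rw [List.getElem_take]
    simpa using hlt i hil hik
  have h2 : (s.drop k).countP (fun y => decide (y < x)) = 0 := by
    rw [List.countP_eq_zero]
    intro a ha
    obtain ⟨i, hi, rfl⟩ := List.getElem_of_mem ha
    have hil : k + i < s.length := by simp at hi; omega
    rw [List.getElem_drop]
    simpa using not_lt.mpr (hge (k + i) hil (by omega))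
  omega

-- Per element, A's run equals B's run.
theorem smallnum_body_eq (nums : List Int) (ans : List Int) (x : Int) :
    (nums.foldl (fun (st : Int × List Int) y =>
        if x > y then (st.1 + 1, st.2 ++ [st.1 + 1]) else st) (0, ans)).2
      = ans ++ PySem.List.pyRange 1
          ((PySem.List.bisectLeft (PySem.List.sorted nums (fun v => v) false) x : Int) + 1) 1 := by
  rw [smallnum_inner_fold]
  have hs : (PySem.List.sorted nums (fun v => v) false).Pairwise (· ≤ ·) :=
    PySem.List.sorted_pairwise nums (fun v => v)
  have hperm := PySem.List.sorted_perm nums (fun v => v) false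
  rw [smallnum_bisect_count _ x hs, hperm.countP_eq]
  simp only [zero_add]
  rw [Int.add_comm]

theorem smallnum_eq_alt (nums : List Int) : smallnum nums = smallnum_alt nums := by
  unfold smallnum smallnum_alt
  apply PySem.List.foldl_congr_mem
  intro ans i _
  rw [PySem.List.foldl_pyRange_zero_pyGetD nums 0
    (fun (st : Int × List Int) y =>
      if PySem.List.pyGetD nums i 0 > y then (st.1 + 1, st.2 ++ [st.1 + 1]) else st)
    (0, ans)]
  exact smallnum_body_eq nums ans (PySem.List.pyGetD nums i 0)

-- ===== VERDICT (by name: the statement is the Claim_ definition above) =====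
theorem smallnum_spec : Claim_equal_smallnum := by
  intro nums _
  unfold Spec_smallnum
  exact smallnum_eq_alt nums
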